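-- pv_equiv track=rewrite | github.com/Issaxv/Zeeks-Compiler | Zeeks/SemanticScan.py | tipos_compatibles
-- ===== SOURCE A (Python) =====
-- def tipos_compatibles(destino, origen):
--     if destino == origen:
--         return True
--     if destino in ('int','float') and origen in ('int','float'):
--         return True
--
--     if destino and origen and destino.endswith('[]') and origen.endswith('[]'):
--         base_d = destino[:-2]
--         base_o = origen[:-2]
--         return tipos_compatibles(base_d, base_o)
--
--     return False
-- ===== SOURCE B (Python) =====
-- def _layers(s):
--     k = 0
--     while s.endswith('[]'):
--         s = s[:-2]
--         k += 1
--     return k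
--
--
-- def tipos_compatibles(destino, origen):
--     k = min(_layers(destino), _layers(origen))
--     d = destino[:len(destino) - 2 * k]
--     o = origen[:len(origen) - 2 * k]
--     return d == o or (d in ('int', 'float') and o in ('int', 'float'))
-- ===== Notes on version B (the rewrite author's own statement) =====
-- stated objective: alternative
-- what changed: Replaces A's level-by-level recursion with a two-phase computation: count each side's trailing '[]' layers once, then do a single comparison of the two strings with the common layer count stripped.
import Mathlib
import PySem

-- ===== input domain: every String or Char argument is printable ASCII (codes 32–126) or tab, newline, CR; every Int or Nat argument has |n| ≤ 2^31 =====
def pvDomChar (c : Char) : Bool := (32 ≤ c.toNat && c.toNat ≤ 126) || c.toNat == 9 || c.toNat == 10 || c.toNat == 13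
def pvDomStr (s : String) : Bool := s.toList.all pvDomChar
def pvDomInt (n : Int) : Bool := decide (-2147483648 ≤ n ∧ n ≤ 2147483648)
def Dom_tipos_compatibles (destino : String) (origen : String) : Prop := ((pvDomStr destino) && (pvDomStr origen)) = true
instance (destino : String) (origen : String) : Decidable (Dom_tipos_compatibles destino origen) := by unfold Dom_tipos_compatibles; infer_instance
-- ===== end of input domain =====

-- B replaces A's per-level recursion by counting each side's trailing "[]" layers once and
-- comparing the two strings stripped of their common layer count (objective: simpler).
-- Strings are processed as code-point lists (PySem.Chars), exact on the stated domain.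

-- ===== PORT A =====
-- literal transliteration of A's recursion over code-point lists
def tiposACore (d : List Char) (o : List Char) : Bool :=
  if d == o then true
  else if (d == "int".toList || d == "float".toList) && (o == "int".toList || o == "float".toList) then true
  else if (!d.isEmpty) && (!o.isEmpty) && PySem.Chars.endswith d "[]".toList && PySem.Chars.endswith o "[]".toList then
    tiposACore (PySem.Chars.slice d none (some (-2))) (PySem.Chars.slice o none (some (-2)))
  else false
termination_by d.length
decreasing_by
  have hd : d ≠ [] := by
    rename_i h; simp only [Bool.and_eq_true, Bool.not_eq_true', List.isEmpty_eq_false_iff] at h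
    exact h.1.1.1
  simp [PySem.Chars.slice_eq_listSlice, PySem.List.slice_to_neg_ofNat d 2 (by omega)]
  have : d.length ≠ 0 := by simpa using hd
  omega

def tipos_compatibles (destino : String) (origen : String) : Bool :=
  tiposACore destino.toList origen.toList

-- ===== PORT B =====
-- Source B's _layers: the while loop stripping trailing "[]" as a recursion, counting levels
def layersCore (s : List Char) : Nat :=
  if PySem.Chars.endswith s "[]".toList then
    layersCore (PySem.Chars.slice s none (some (-2))) + 1
  else 0
termination_by s.length
decreasing_by
  have hlen : 2 ≤ s.length := by
    rename_i h
    have := (PySem.Chars.endswith_iff (s := s) (p := "[]".toList)).mp h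
    simpa using this.length_le
  simp [PySem.Chars.slice_eq_listSlice, PySem.List.slice_to_neg_ofNat s 2 (by omega)]
  omega

-- Source B's body on code-point lists
def tiposBCore (d : List Char) (o : List Char) : Bool :=
  let k := min (layersCore d) (layersCore o)
  let d2 := PySem.Chars.slice d none (some ((d.length : Int) - 2 * (k : Int)))
  let o2 := PySem.Chars.slice o none (some ((o.length : Int) - 2 * (k : Int)))
  d2 == o2 || ((d2 == "int".toList || d2 == "float".toList) && (o2 == "int".toList || o2 == "float".toList))

def tipos_compatibles_alt (destino : String) (origen : String) : Bool :=
  tiposBCore destino.toList origen.toList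

-- ===== PRECONDITION & SPEC =====
def Spec_tipos_compatibles (destino : String) (origen : String) (out : Bool) : Prop := out = tipos_compatibles_alt destino origen
instance (destino : String) (origen : String) (out : Bool) : Decidable (Spec_tipos_compatibles destino origen out) := by unfold Spec_tipos_compatibles; infer_instance

-- ===== CLAIM (what is proved, stated in full; the proofs are below) =====
def Claim_equal_tipos_compatibles : Prop := ∀ (destino : String) (origen : String), Dom_tipos_compatibles destino origen → Spec_tipos_compatibles destino origen (tipos_compatibles destino origen)

-- ===== LEMMAS AND PROOFS =====

theorem slice2_eq (s : List Char) : PySem.Chars.slice s none (some (-2)) = s.take (s.length - 2) := by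
  simp [PySem.Chars.slice_eq_listSlice, PySem.List.slice_to_neg_ofNat s 2 (by omega)]

theorem sliceNN (s : List Char) (k : Nat) (h : 2 * k ≤ s.length) :
    PySem.Chars.slice s none (some ((s.length : Int) - 2 * (k : Int))) = s.take (s.length - 2 * k) := by
  simp only [PySem.Chars.slice_eq_listSlice]
  rw [PySem.List.slice_to _ (by omega)]
  congr 1
  omega

theorem ends_two {s : List Char} (h : PySem.Chars.endswith s "[]".toList = true) : 2 ≤ s.length := by
  have := (PySem.Chars.endswith_iff (s := s) (p := "[]".toList)).mp h
  simpa using this.length_le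

theorem layers_zero {s : List Char} (h : PySem.Chars.endswith s "[]".toList = false) :
    layersCore s = 0 := by
  have brl : "[]".toList = ['[', ']'] := rfl
  rw [brl] at h
  rw [layersCore]
  exact if_neg (by simp [h])

theorem layers_succ {s : List Char} (h : PySem.Chars.endswith s "[]".toList = true) :
    layersCore s = layersCore (s.take (s.length - 2)) + 1 := by
  rw [layersCore]
  rw [if_pos h, slice2_eq]

theorem layers_le_aux : ∀ n : Nat, ∀ s : List Char, s.length ≤ n → 2 * layersCore s ≤ s.length := by
  intro n
  induction n with
  | zero =>
    intro s h
    have hs : s = [] := by cases s <;> simp_all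
    subst hs
    rw [layers_zero (by decide)]
    simp
  | succ n ih =>
    intro s h
    by_cases he : PySem.Chars.endswith s "[]".toList = true
    · have h2 := ends_two he
      rw [layers_succ he]
      have := ih (s.take (s.length - 2)) (by simp only [List.length_take]; omega)
      simp only [List.length_take] at this
      omega
    · rw [layers_zero (by simpa using he)]
      omega

theorem layers_le (s : List Char) : 2 * layersCore s ≤ s.length :=
  layers_le_aux s.length s le_rfl

theorem tiposB_refl (d : List Char) : tiposBCore d d = true := by
  simp [tiposBCore]

theorem tiposB_top {d o : List Char} (h0 : min (layersCore d) (layersCore o) = 0) :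
    tiposBCore d o = ((d == o) || ((d == "int".toList || d == "float".toList) && (o == "int".toList || o == "float".toList))) := by
  simp only [tiposBCore]
  rw [h0, sliceNN d 0 (by omega), sliceNN o 0 (by omega)]
  simp only [Nat.mul_zero, Nat.sub_zero, List.take_length]

theorem tiposB_step {d o : List Char}
    (hd : PySem.Chars.endswith d "[]".toList = true)
    (ho : PySem.Chars.endswith o "[]".toList = true) :
    tiposBCore d o = tiposBCore (d.take (d.length - 2)) (o.take (o.length - 2)) := by
  have hd2 := ends_two hd
  have ho2 := ends_two ho
  simp only [tiposBCore]
  rw [layers_succ hd, layers_succ ho]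
  set kd := layersCore (d.take (d.length - 2)) with hkd
  set ko := layersCore (o.take (o.length - 2)) with hko
  have hkdle : 2 * kd ≤ d.length - 2 := by
    have h1 : 2 * kd ≤ (d.take (d.length - 2)).length := hkd ▸ layers_le _
    simp only [List.length_take] at h1
    omega
  have hkole : 2 * ko ≤ o.length - 2 := by
    have h1 : 2 * ko ≤ (o.take (o.length - 2)).length := hko ▸ layers_le _
    simp only [List.length_take] at h1
    omega
  have hmin : min (kd + 1) (ko + 1) = min kd ko + 1 := by omega
  rw [hmin]
  set k := min kd ko with hk
  rw [sliceNN d (k + 1) (by omega), sliceNN o (k + 1) (by omega),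
      sliceNN (d.take (d.length - 2)) k (by simp only [List.length_take]; omega),
      sliceNN (o.take (o.length - 2)) k (by simp only [List.length_take]; omega)]
  have ed : List.take (d.length - 2 * (k + 1)) d
      = List.take ((d.take (d.length - 2)).length - 2 * k) (d.take (d.length - 2)) := by
    rw [List.take_take]
    congr 1
    simp only [List.length_take]
    omega
  have eo : List.take (o.length - 2 * (k + 1)) o
      = List.take ((o.take (o.length - 2)).length - 2 * k) (o.take (o.length - 2)) := by
    rw [List.take_take]
    congr 1
    simp only [List.length_take]
    omega
  rw [ed, eo]

theorem main_core_aux : ∀ n : Nat, ∀ d o : List Char, d.length ≤ n → tiposACore d o = tiposBCore d o := by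
  intro n
  induction n using Nat.strong_induction_on with
  | _ n ih =>
  intro d o hdn
  rw [tiposACore]
  by_cases heq : d = o
  · subst heq
    simp [tiposB_refl]
  · have heqb : (d == o) = false := by simpa using heq
    rw [if_neg (by simp [heq])]
    by_cases hnum : ((d == "int".toList || d == "float".toList) && (o == "int".toList || o == "float".toList)) = true
    · rw [if_pos hnum]
      have hd0 : layersCore d = 0 := by
        rcases Bool.or_eq_true_iff.mp (Bool.and_eq_true_iff.mp hnum).1 with h | h <;>
          rw [show d = _ from by simpa using h] <;> exact layers_zero (by decide)
      rw [tiposB_top (by omega)]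
      rw [hnum, Bool.or_true]
    · rw [if_neg hnum]
      by_cases hrec : ((!d.isEmpty) && (!o.isEmpty) && PySem.Chars.endswith d "[]".toList && PySem.Chars.endswith o "[]".toList) = true
      · rw [if_pos hrec]
        simp only [Bool.and_eq_true] at hrec
        obtain ⟨⟨⟨-, -⟩, hd⟩, ho⟩ := hrec
        rw [slice2_eq, slice2_eq]
        rw [ih (d.length - 2) (by have := ends_two hd; omega) _ _ (by simp only [List.length_take]; omega)]
        exact (tiposB_step hd ho).symm
      · rw [if_neg hrec]
        have hzero : layersCore d = 0 ∨ layersCore o = 0 := by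
          by_cases hd : PySem.Chars.endswith d "[]".toList = true
          · by_cases ho : PySem.Chars.endswith o "[]".toList = true
            · exfalso
              apply hrec
              have hd2 := ends_two hd
              have ho2 := ends_two ho
              have hdne : d.isEmpty = false := by cases d <;> simp_all
              have hone : o.isEmpty = false := by cases o <;> simp_all
              rw [hdne, hone, hd, ho]
              rfl
            · exact Or.inr (layers_zero (by simpa using ho))
          · exact Or.inl (layers_zero (by simpa using hd))
        rw [tiposB_top (by omega)]
        have hnumf : ((d == "int".toList || d == "float".toList) && (o == "int".toList || o == "float".toList)) = false := by
          simpa using hnum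
        rw [heqb, hnumf, Bool.or_self]

-- ===== VERDICT (by name: the statement is the Claim_ definition above) =====
theorem tipos_compatibles_spec : Claim_equal_tipos_compatibles := by
  intro destino origen _
  unfold Spec_tipos_compatibles tipos_compatibles tipos_compatibles_alt
  exact main_core_aux destino.toList.length destino.toList origen.toList le_rfl
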